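-- pv_equiv track=rewrite | github.com/HotShot003/Data-Structure-Practice-Questions | Step1-Learn The Basics/Number Logics/NumberLogics40.py | is_magic_number
-- ===== SOURCE A (Python) =====
-- def sum_of_digits(number):
--     digit_sum = 0
--
--     while number > 0:
--         digit_sum += number % 10
--         number //= 10
--
--     return digit_sum
--
-- def is_magic_number(s,e):
--     mgcnum=[]
--     for number in range(s,e+1):
--         orgi=number
--         while number > 9:
--             number = sum_of_digits(number)
--
--         if number == 1:
--             mgcnum.append(orgi)
--     return mgcnum
-- ===== SOURCE B (Python) =====
-- def is_magic_number(s, e):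
--     start = s if s > 1 else 1
--     start += (1 - start) % 9
--     return list(range(start, e + 1, 9))
-- ===== Notes on version B (the rewrite author's own statement) =====
-- stated objective: alternative
-- what changed: B replaces the per-number repeated digit-sum loops with the digital-root closed form (magic numbers in [s,e] are exactly the positive n with n % 9 == 1) and emits them directly as one range(start, e+1, 9); intended as faster (O(output) vs O((e-s) log e)) but a timing run did not confirm it consistently, so no speed is claimed.
import Mathlib
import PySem

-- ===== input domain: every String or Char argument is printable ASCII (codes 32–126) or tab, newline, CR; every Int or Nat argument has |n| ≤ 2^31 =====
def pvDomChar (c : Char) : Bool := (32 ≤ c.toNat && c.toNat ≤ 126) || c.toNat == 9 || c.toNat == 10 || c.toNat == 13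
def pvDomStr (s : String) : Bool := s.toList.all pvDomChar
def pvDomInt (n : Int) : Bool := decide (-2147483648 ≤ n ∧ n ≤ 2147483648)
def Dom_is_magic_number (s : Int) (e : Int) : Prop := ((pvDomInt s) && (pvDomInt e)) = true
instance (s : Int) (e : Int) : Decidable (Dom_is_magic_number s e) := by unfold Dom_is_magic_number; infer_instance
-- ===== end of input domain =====

-- B replaces A's per-number repeated digit-sum loops with the digital-root closed form
-- (positive n with n % 9 == 1), emitted directly as one step-9 range: a different algorithm.


-- ===== PORT A =====
-- the `while number > 0` loop of sum_of_digits, with a totality fuel that never runs out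
-- (the loop strictly shrinks `number`, so `number.toNat + 1` steps always suffice; each pass strictly shrinks a positive `number`)
def pvSodGo : Nat → Int → Int → Int
  | 0, _, digit_sum => digit_sum
  | fuel + 1, number, digit_sum =>
    if number > 0 then
      pvSodGo fuel (PySem.Int.floordiv number 10) (digit_sum + PySem.Int.mod number 10)
    else digit_sum

def pvSumOfDigits (number : Int) : Int := pvSodGo (number.toNat + 1) number 0

-- the `while number > 9` loop of is_magic_number, same fuel guard (the digit sum of a number > 9 is smaller and nonnegative)
def pvDrGo : Nat → Int → Int
  | 0, number => number
  | fuel + 1, number => if number > 9 then pvDrGo fuel (pvSumOfDigits number) else number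

def pvDigitRoot (number : Int) : Int := pvDrGo (number.toNat + 1) number

def is_magic_number (s : Int) (e : Int) : List Int :=
  (PySem.List.pyRange s (e + 1) 1).foldl
    (fun mgcnum number => if pvDigitRoot number == 1 then mgcnum ++ [number] else mgcnum) []

-- ===== PORT B =====
def is_magic_number_alt (s : Int) (e : Int) : List Int :=
  let start0 := if s > 1 then s else 1
  let start := start0 + PySem.Int.mod (1 - start0) 9
  PySem.List.pyRange start (e + 1) 9

-- ===== PRECONDITION & SPEC =====
def Spec_is_magic_number (s : Int) (e : Int) (out : List Int) : Prop := out = is_magic_number_alt s e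
instance (s : Int) (e : Int) (out : List Int) : Decidable (Spec_is_magic_number s e out) := by unfold Spec_is_magic_number; infer_instance

-- ===== CLAIM (what is proved, stated in full; the proofs are below) =====
def Claim_equal_is_magic_number : Prop := ∀ (s : Int) (e : Int), Dom_is_magic_number s e → Spec_is_magic_number s e (is_magic_number s e)

-- ===== LEMMAS AND PROOFS =====

-- the digit-sum accumulator splits off
theorem pvSodGo_acc : ∀ (f : Nat) (n acc : Int), pvSodGo f n acc = acc + pvSodGo f n 0 := by
  intro f
  induction f with
  | zero => intro n acc; simp [pvSodGo]
  | succ f ih =>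
    intro n acc
    simp only [pvSodGo]
    split
    · rw [ih _ (acc + PySem.Int.mod n 10), ih _ (0 + PySem.Int.mod n 10)]
      ring
    · ring

-- with enough fuel: the digit sum is nonnegative, ≤ n, and keeps n's residue mod 9
theorem pvSodGo_facts : ∀ (f : Nat) (n : Int), n.toNat < f →
    0 ≤ pvSodGo f n 0 ∧ (0 ≤ n → pvSodGo f n 0 ≤ n ∧ pvSodGo f n 0 % 9 = n % 9) := by
  intro f
  induction f with
  | zero => omega
  | succ f ih =>
    intro n hf
    simp only [pvSodGo]
    split
    · rename_i hpos
      have h10 : PySem.Int.floordiv n 10 = n / 10 := PySem.Int.floordiv_eq_ediv_of_pos (by omega)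
      have hm : PySem.Int.mod n 10 = n % 10 := PySem.Int.mod_eq_emod_of_pos (by omega)
      rw [pvSodGo_acc, h10, hm]
      have := ih (n / 10) (by omega)
      omega
    · omega

theorem pvSumOfDigits_facts (n : Int) :
    0 ≤ pvSumOfDigits n ∧ (0 ≤ n → pvSumOfDigits n ≤ n ∧ pvSumOfDigits n % 9 = n % 9) :=
  pvSodGo_facts (n.toNat + 1) n (by omega)

theorem pvSumOfDigits_lt (n : Int) (h : n > 9) : pvSumOfDigits n < n := by
  have h10 : PySem.Int.floordiv n 10 = n / 10 := PySem.Int.floordiv_eq_ediv_of_pos (by omega)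
  have hm : PySem.Int.mod n 10 = n % 10 := PySem.Int.mod_eq_emod_of_pos (by omega)
  unfold pvSumOfDigits
  simp only [pvSodGo, if_pos (by omega : n > 0)]
  rw [pvSodGo_acc, h10, hm]
  have := pvSodGo_facts n.toNat (n / 10) (by omega)
  omega

-- with enough fuel the digital-root loop lands in [0, 9] and keeps the residue mod 9
theorem pvDrGo_facts : ∀ (f : Nat) (n : Int), n.toNat < f → 0 ≤ n →
    0 ≤ pvDrGo f n ∧ pvDrGo f n ≤ 9 ∧ pvDrGo f n % 9 = n % 9 := by
  intro f
  induction f with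
  | zero => omega
  | succ f ih =>
    intro n hf hn
    simp only [pvDrGo]
    split
    · rename_i h9
      have h1 := pvSumOfDigits_lt n (by omega)
      have h2 := (pvSumOfDigits_facts n).1
      have h3 := ((pvSumOfDigits_facts n).2 (by omega)).2
      have := ih (pvSumOfDigits n) (by omega) h2
      omega
    · omega

theorem pvDigitRoot_eq_one_iff (n : Int) : (pvDigitRoot n = 1) ↔ (1 ≤ n ∧ n % 9 = 1) := by
  by_cases hn : 0 ≤ n
  · have h := pvDrGo_facts (n.toNat + 1) n (by omega) hn
    unfold pvDigitRoot at h ⊢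
    constructor
    · intro h1
      refine ⟨?_, by omega⟩
      by_cases h9 : n > 9
      · omega
      · simp only [pvDrGo, if_neg h9] at h1
        omega
    · intro ⟨_, h9⟩
      omega
  · unfold pvDigitRoot
    simp only [pvDrGo, if_neg (by omega : ¬ n > 9)]
    omega

-- B's start value, as a plain function
def pvStart (s : Int) : Int :=
  (if s > 1 then s else 1) + PySem.Int.mod (1 - (if s > 1 then s else 1)) 9

theorem pvStart_mod (s : Int) : pvStart s % 9 = 1 % 9 ∧ (if s > 1 then s else 1) ≤ pvStart s ∧
    pvStart s < (if s > 1 then s else 1) + 9 := by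
  unfold pvStart
  rw [PySem.Int.mod_eq_emod_of_pos (by omega)]
  split <;> omega

-- step-9 range: nil and cons forms
theorem pyRange_nine_nil (a b : Int) (h : b ≤ a) : PySem.List.pyRange a b 9 = [] := by
  rw [PySem.List.pyRange_of_pos a b (by omega)]
  rw [if_neg (by omega)]
  simp

theorem pyRange_nine_cons (a b : Int) (h : a < b) :
    PySem.List.pyRange a b 9 = a :: PySem.List.pyRange (a + 9) b 9 := by
  rw [PySem.List.pyRange_of_pos a b (by omega), PySem.List.pyRange_of_pos (a+9) b (by omega)]
  rw [if_pos h]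
  by_cases h9 : a + 9 < b
  · rw [if_pos h9]
    have hcnt : ((b - a + 9 - 1) / 9).toNat = ((b - (a + 9) + 9 - 1) / 9).toNat + 1 := by omega
    rw [hcnt, List.range_succ_eq_map]
    simp only [List.map_cons, List.map_map]
    refine List.cons_eq_cons.mpr ⟨by norm_num, ?_⟩
    apply List.map_congr_left
    intro x _
    simp only [Function.comp_apply, Nat.succ_eq_add_one]
    push_cast
    ring
  · rw [if_neg h9]
    have hcnt : ((b - a + 9 - 1) / 9).toNat = 1 := by omega
    rw [hcnt]
    simp

-- the filtered consecutive range is the step-9 range from B's start value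
theorem pvStart_filter : ∀ (k : Nat) (s b : Int), (b - s).toNat = k →
    (PySem.List.pyRange s b 1).filter (fun n => pvDigitRoot n == 1) =
      PySem.List.pyRange (pvStart s) b 9 := by
  intro k
  induction k with
  | zero =>
    intro s b hk
    rw [PySem.List.pyRange_one_eq_nil (by omega)]
    have := pvStart_mod s
    rw [pyRange_nine_nil _ _ (by split at this <;> omega)]
    simp
  | succ k ih =>
    intro s b hk
    rw [PySem.List.pyRange_one_cons (by omega)]
    rw [List.filter_cons]
    have hmod := pvStart_mod s
    have hmod1 := pvStart_mod (s + 1)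
    by_cases hp : pvDigitRoot s = 1
    · obtain ⟨hs1, hs9⟩ := (pvDigitRoot_eq_one_iff s).mp hp
      have hstart : pvStart s = s := by
        rcases hmod with ⟨h1, h2, h3⟩
        split at h2 <;> split at h3 <;> omega
      have hstart1 : pvStart (s + 1) = s + 9 := by
        rcases hmod1 with ⟨h1, h2, h3⟩
        split at h2 <;> split at h3 <;> omega
      rw [if_pos (by simp [hp])]
      rw [ih (s + 1) b (by omega), hstart1, hstart, pyRange_nine_cons s b (by omega)]
    · have hstart1 : pvStart (s + 1) = pvStart s := by
        have hs : ¬ (1 ≤ s ∧ s % 9 = 1) := fun h => hp ((pvDigitRoot_eq_one_iff s).mpr h)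
        rcases hmod with ⟨h1, h2, h3⟩
        rcases hmod1 with ⟨h4, h5, h6⟩
        split at h2 <;> split at h3 <;> split at h5 <;> split at h6 <;> omega
      rw [if_neg (by simp [hp])]
      rw [ih (s + 1) b (by omega), hstart1]

-- ===== VERDICT (by name: the statement is the Claim_ definition above) =====
theorem is_magic_number_spec : Claim_equal_is_magic_number := by
  intro s e _
  unfold Spec_is_magic_number is_magic_number is_magic_number_alt
  have hfold := PySem.List.foldl_append_if (fun n => pvDigitRoot n == 1) (fun n => n)
    (PySem.List.pyRange s (e + 1) 1) []
  simp only [List.map_id_fun', id] at hfold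
  rw [hfold]
  simp only [List.nil_append]
  rw [pvStart_filter ((e + 1 - s).toNat) s (e + 1) rfl]
  rfl
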